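-- pv_equiv track=rewrite | github.com/ericu9500/PapyriAndInscriptions | train_data/15_prepare_train_text_for_comparison.py | reassemble_text_with_placeholder
-- ===== SOURCE A (Python) =====
-- def reassemble_text_with_placeholder(grouped_sequences):
--     reassembled_text = ""
--     placeholder_inserted = False
--
--     for count, token_type, tokens in grouped_sequences:
--         for token in tokens:
--             if token == "X" and not placeholder_inserted:
--                 masked_count = sum(1 for t in tokens if t == "X" and t not in [" ", "·"])
--                 reassembled_text += f"[{masked_count} letters missing]"
--                 placeholder_inserted = True
--             elif token != "X":
--                 reassembled_text += token
--
--     return reassembled_text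
-- ===== SOURCE B (Python) =====
-- def reassemble_text_with_placeholder(grouped_sequences):
--     # Two-phase: locate the first group containing "X", then render
--     # prefix + placeholder + suffix, instead of one interleaved scan with a flag.
--     groups = [g[2] for g in grouped_sequences]
--     pre = []
--     rest = groups
--     while rest:
--         toks, rest = rest[0], rest[1:]
--         if "X" in toks:
--             j = toks.index("X")
--             n = toks.count("X")
--             return ("".join(pre)
--                     + "".join(toks[:j])
--                     + f"[{n} letters missing]"
--                     + "".join(t for t in toks[j + 1:] if t != "X")
--                     + "".join("".join(t for t in g if t != "X") for g in rest))
--         pre.append("".join(toks))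
--     return "".join(pre)
-- ===== Notes on version B (the rewrite author's own statement) =====
-- stated objective: alternative
-- what changed: Replaces A's single interleaved scan with a mutable placeholder flag by a locate-then-render decomposition: find the first group containing "X", then assemble prefix, placeholder (with that group's X count) and X-filtered suffix.
import Mathlib
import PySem

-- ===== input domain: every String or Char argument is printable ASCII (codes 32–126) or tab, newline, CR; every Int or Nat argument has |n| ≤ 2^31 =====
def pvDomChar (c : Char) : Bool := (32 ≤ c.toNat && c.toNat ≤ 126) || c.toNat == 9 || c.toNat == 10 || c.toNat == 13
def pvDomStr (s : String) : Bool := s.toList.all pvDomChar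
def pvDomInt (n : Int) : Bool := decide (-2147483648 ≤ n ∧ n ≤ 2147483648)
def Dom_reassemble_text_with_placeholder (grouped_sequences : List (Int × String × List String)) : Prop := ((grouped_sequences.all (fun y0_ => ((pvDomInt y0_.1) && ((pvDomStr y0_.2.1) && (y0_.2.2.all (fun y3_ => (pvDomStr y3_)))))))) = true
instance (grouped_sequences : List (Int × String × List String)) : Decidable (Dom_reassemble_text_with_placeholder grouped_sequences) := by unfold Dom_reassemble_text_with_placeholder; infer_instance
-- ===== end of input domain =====

-- B replaces A's single interleaved scan with a mutable flag by a locate-then-render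
-- decomposition (find the first group containing "X", then assemble prefix + placeholder + suffix).

-- ===== PORT A =====
def reassemble_text_with_placeholder (grouped_sequences : List (Int × String × List String)) : String :=
  (grouped_sequences.foldl
    (fun (st : String × Bool) (g : Int × String × List String) =>
      g.2.2.foldl
        (fun (st2 : String × Bool) (token : String) =>
          if token == "X" && !st2.2 then
            (st2.1 ++ "[" ++ PySem.Int.toStr
                (g.2.2.foldl (fun (acc : Int) (t : String) =>
                  if t == "X" && !(t == " " || t == "·") then acc + 1 else acc) 0)
              ++ " letters missing]", true)
          else if token != "X" then (st2.1 ++ token, st2.2)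
          else st2)
        st)
    ("", false)).1

-- ===== PORT B =====
-- "".join over a list of strings
def pvJoin (l : List String) : String := PySem.Str.join "" l
-- "".join(t for t in g if t != "X")
def pvJoinNonX (g : List String) : String := pvJoin (g.filter (fun t => t != "X"))

-- the while loop of Source B: `pre` is the accumulated list of joined X-free groups
def pvAltLoop (pre : List (String)) : List (List String) → String
  | [] => pvJoin pre
  | toks :: rest =>
    if toks.contains "X" then
      let j : Nat := (PySem.List.index? toks "X").getD 0
      let n : Int := (PySem.List.count toks "X" : Int)
      pvJoin pre ++ pvJoin (toks.take j)
        ++ "[" ++ PySem.Int.toStr n ++ " letters missing]"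
        ++ pvJoinNonX (toks.drop (j + 1))
        ++ pvJoin (rest.map pvJoinNonX)
    else pvAltLoop (pre ++ [pvJoin toks]) rest

def reassemble_text_with_placeholder_alt (grouped_sequences : List (Int × String × List String)) : String :=
  pvAltLoop [] (grouped_sequences.map (fun g => g.2.2))

-- ===== PRECONDITION & SPEC =====
def Spec_reassemble_text_with_placeholder (grouped_sequences : List (Int × String × List String)) (out : String) : Prop := out = reassemble_text_with_placeholder_alt grouped_sequences
instance (grouped_sequences : List (Int × String × List String)) (out : String) : Decidable (Spec_reassemble_text_with_placeholder grouped_sequences out) := by unfold Spec_reassemble_text_with_placeholder; infer_instance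

-- ===== CLAIM (what is proved, stated in full; the proofs are below) =====
def Claim_equal_reassemble_text_with_placeholder : Prop := ∀ (grouped_sequences : List (Int × String × List String)), Dom_reassemble_text_with_placeholder grouped_sequences → Spec_reassemble_text_with_placeholder grouped_sequences (reassemble_text_with_placeholder grouped_sequences)

-- ===== LEMMAS AND PROOFS =====

-- A's inner step, with the placeholder string abstracted out
def stepA (P : String) (st2 : String × Bool) (token : String) : String × Bool :=
  if token == "X" && !st2.2 then (st2.1 ++ P, true)
  else if token != "X" then (st2.1 ++ token, st2.2)
  else st2

-- A's placeholder string for a given group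
def phA (toks : List String) : String :=
  "[" ++ PySem.Int.toStr
      (toks.foldl (fun (acc : Int) (t : String) =>
        if t == "X" && !(t == " " || t == "·") then acc + 1 else acc) 0)
    ++ " letters missing]"

-- A's processing of one group
def gstepA (st : String × Bool) (g : Int × String × List String) : String × Bool :=
  g.2.2.foldl (stepA (phA g.2.2)) st

theorem portA_eq (gs : List (Int × String × List String)) :
    reassemble_text_with_placeholder gs = (gs.foldl gstepA ("", false)).1 := by
  unfold reassemble_text_with_placeholder gstepA stepA phA
  simp [String.append_assoc]

theorem pvJoin_nil : pvJoin [] = "" := rfl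

theorem intercalate_nil_cons (a : List Char) (l : List (List Char)) :
    List.intercalate [] (a :: l) = a ++ List.intercalate [] l := by
  cases l <;> simp [List.intercalate, List.intersperse]

theorem pvJoin_cons (x : String) (xs : List String) : pvJoin (x :: xs) = x ++ pvJoin xs := by
  show String.ofList (List.intercalate [] (x.toList :: xs.map String.toList))
      = x ++ String.ofList (List.intercalate [] (xs.map String.toList))
  rw [intercalate_nil_cons]
  simp

theorem pvJoin_append (a b : List String) : pvJoin (a ++ b) = pvJoin a ++ pvJoin b := by
  induction a with
  | nil => simp [pvJoin_nil]
  | cons x xs ih => simp [pvJoin_cons, ih, String.append_assoc]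

theorem pvJoin_singleton (x : String) : pvJoin [x] = x := by
  simp [pvJoin_cons, pvJoin_nil]

-- the masked-count fold equals count "X"
theorem maskedCount_eq (toks : List String) :
    (toks.foldl (fun (acc : Int) (t : String) =>
        if t == "X" && !(t == " " || t == "·") then acc + 1 else acc) 0)
      = (toks.count "X" : Int) := by
  rw [PySem.List.foldl_if_add_one]
  have h : toks.countP (fun t => t == "X" && !(t == " " || t == "·")) = toks.count "X" := by
    rw [List.count]
    apply List.countP_congr
    intro t _
    by_cases ht : t = "X"
    · subst ht; decide
    · simp [ht]
  rw [h]; simp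

-- inner fold with the flag already set: appends the non-X tokens
theorem foldl_stepA_true (P : String) (toks : List String) (s : String) :
    toks.foldl (stepA P) (s, true) = (s ++ pvJoinNonX toks, true) := by
  induction toks generalizing s with
  | nil => simp [pvJoinNonX, pvJoin_nil]
  | cons t ts ih =>
    by_cases ht : t = "X"
    · subst ht
      simp [stepA, ih, pvJoinNonX]
    · simp [List.foldl_cons, stepA, ht, ih, pvJoinNonX, pvJoin_cons, String.append_assoc]

-- inner fold, flag unset, no "X": appends all tokens, flag stays unset
theorem foldl_stepA_noX (P : String) (toks : List String) (s : String) (h : "X" ∉ toks) :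
    toks.foldl (stepA P) (s, false) = (s ++ pvJoin toks, false) := by
  induction toks generalizing s with
  | nil => simp [pvJoin_nil]
  | cons t ts ih =>
    have ht : t ≠ "X" := fun e => h (e ▸ List.mem_cons_self)
    have hts : "X" ∉ ts := fun e => h (List.mem_cons_of_mem _ e)
    simp [List.foldl_cons, stepA, ht, ih _ hts, pvJoin_cons, String.append_assoc]

-- inner fold, flag unset, first "X" after pre: prefix + placeholder + filtered suffix
theorem foldl_stepA_X (P : String) (pre suf : List String) (s : String) (h : "X" ∉ pre) :
    (pre ++ "X" :: suf).foldl (stepA P) (s, false)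
      = (s ++ pvJoin pre ++ P ++ pvJoinNonX suf, true) := by
  rw [List.foldl_append, foldl_stepA_noX P pre s h]
  show (("X" :: suf).foldl (stepA P) _) = _
  rw [List.foldl_cons]
  have : stepA P (s ++ pvJoin pre, false) "X" = (s ++ pvJoin pre ++ P, true) := by
    simp [stepA]
  rw [this, foldl_stepA_true]

-- outer fold with the flag already set
theorem foldl_gstepA_true (gs : List (Int × String × List String)) (s : String) :
    gs.foldl gstepA (s, true) = (s ++ pvJoin (gs.map (fun g => pvJoinNonX g.2.2)), true) := by
  induction gs generalizing s with
  | nil => simp [pvJoin_nil]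
  | cons g rest ih =>
    rw [List.foldl_cons]
    show (rest.foldl gstepA (gstepA (s, true) g)) = _
    rw [show gstepA (s, true) g = (s ++ pvJoinNonX g.2.2, true) from foldl_stepA_true _ _ _]
    rw [ih]
    simp [pvJoin_cons, String.append_assoc]

-- main invariant: A's outer fold from an unset flag equals B's loop, where the
-- accumulated string is the join of B's accumulated prefix list
theorem main_inv (gs : List (Int × String × List String)) (pre : List String) (s : String)
    (hs : s = pvJoin pre) :
    (gs.foldl gstepA (s, false)).1 = pvAltLoop pre (gs.map (fun g => g.2.2)) := by
  induction gs generalizing pre s with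
  | nil => simpa [pvAltLoop] using hs
  | cons g rest ih =>
    rw [List.map_cons]
    by_cases hx : "X" ∈ g.2.2
    · -- the first group containing "X"
      have hc : (g.2.2).contains "X" = true := by
        simpa using hx
      obtain ⟨k, hk⟩ : ∃ k, PySem.List.index? g.2.2 "X" = some k := by
        have := (PySem.List.index?_isSome_iff (xs := g.2.2) (v := "X")).2 hx
        exact Option.isSome_iff_exists.mp this
      obtain ⟨p2, suf, htoks, hlen, hnp⟩ := (PySem.List.index?_eq_some_iff _ _ _).1 hk
      -- A side
      rw [List.foldl_cons]
      show (rest.foldl gstepA (gstepA (s, false) g)).1 = _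
      rw [show gstepA (s, false) g
            = (s ++ pvJoin p2 ++ phA g.2.2 ++ pvJoinNonX suf, true) from by
        unfold gstepA; rw [htoks]; exact foldl_stepA_X _ _ _ _ hnp]
      rw [foldl_gstepA_true]
      -- B side
      unfold pvAltLoop
      rw [if_pos hc, hk]
      have hj : (some k).getD 0 = k := rfl
      have htake : (g.2.2).take k = p2 := by
        rw [htoks, ← hlen, List.take_left]
      have hdrop : (g.2.2).drop (k + 1) = suf := by
        rw [htoks, ← hlen]
        rw [show p2.length + 1 = (p2 ++ ["X"]).length by simp]
        rw [show p2 ++ "X" :: suf = (p2 ++ ["X"]) ++ suf by simp]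
        exact List.drop_left
      have hph : phA g.2.2 = "[" ++ PySem.Int.toStr ((PySem.List.count g.2.2 "X" : Int))
          ++ " letters missing]" := by
        unfold phA
        rw [maskedCount_eq]
        simp [PySem.List.count]
      simp only [Option.getD_some, htake, hdrop, hph, hs, List.map_map]
      simp [String.append_assoc, Function.comp_def]
    · -- no "X" in this group: accumulate and recurse
      have hc : (g.2.2).contains "X" = false := by
        simpa using hx
      rw [List.foldl_cons]
      show (rest.foldl gstepA (gstepA (s, false) g)).1 = _
      rw [show gstepA (s, false) g = (s ++ pvJoin g.2.2, false) from
        foldl_stepA_noX _ _ _ hx]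
      unfold pvAltLoop
      rw [if_neg (by simp [hx])]
      exact ih (pre ++ [pvJoin g.2.2]) _ (by rw [hs, pvJoin_append, pvJoin_singleton])

-- ===== VERDICT (by name: the statement is the Claim_ definition above) =====
theorem reassemble_text_with_placeholder_spec : Claim_equal_reassemble_text_with_placeholder := by
  intro gs _
  unfold Spec_reassemble_text_with_placeholder reassemble_text_with_placeholder_alt
  rw [portA_eq]
  exact main_inv gs [] "" rfl
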